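-- pv_equiv track=rewrite | github.com/DragunWF/Competitive-Programming | CodeWars/python/5_kyu/roman_fractions.py | roman_fractions
-- ===== SOURCE A (Python) =====
-- def roman_fractions(n, fraction=None):
--     if (n < 0 or n > 5000) or (fraction is not None and (fraction < 0 or fraction > 12)) or (n == 0 and fraction == 12):
--         return "NaR"
--     if n == 0 and (fraction is None or fraction == 0):
--         return "N"
--     values = {
--         "M": 1000,
--         "CM": 900,
--         "D": 500,
--         "CD": 400,
--         "C": 100,
--         "XC": 90,
--         "L": 50,
--         "XL": 40,
--         "X": 10,
--         "IX": 9,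
--         "V": 5,
--         "IV": 4,
--         "I": 1
--     }
--     fraction_values = ((
--         ".", ":", ":.", "::",
--         ":.:", "S", "S.", "S:",
--         "S:.", "S::", "S:.:", "I"
--     ))
--     output = ""
--     for symbol in values:
--         symbol_count = n // values[symbol]
--         if symbol_count >= 1:
--             n -= symbol_count * values[symbol]
--             output += symbol * symbol_count
--     return f"{output}{fraction_values[fraction - 1]}" if fraction else output
-- ===== SOURCE B (Python) =====
-- def roman_fractions(n, fraction=None):
--     if (n < 0 or n > 5000) or (fraction is not None and (fraction < 0 or fraction > 12)) or (n == 0 and fraction == 12):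
--         return "NaR"
--     if n == 0 and (fraction is None or fraction == 0):
--         return "N"
--     units = ["", "I", "II", "III", "IV", "V", "VI", "VII", "VIII", "IX"]
--     tens = ["", "X", "XX", "XXX", "XL", "L", "LX", "LXX", "LXXX", "XC"]
--     hundreds = ["", "C", "CC", "CCC", "CD", "D", "DC", "DCC", "DCCC", "CM"]
--     thousands = ["", "M", "MM", "MMM", "MMMM", "MMMMM"]
--     fraction_values = (".", ":", ":.", "::", ":.:", "S", "S.", "S:", "S:.", "S::", "S:.:", "I")
--     output = (thousands[n // 1000] + hundreds[n % 1000 // 100]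
--               + tens[n % 100 // 10] + units[n % 10])
--     if fraction:
--         return output + fraction_values[fraction - 1]
--     return output
-- ===== Notes on version B (the rewrite author's own statement) =====
-- stated objective: alternative
-- what changed: Replaces the greedy subtract-and-repeat loop over the 13-entry value dict with a direct place-value decomposition using four precomputed digit tables (thousands/hundreds/tens/units), keeping the validation prelude and fraction suffix.
import Mathlib
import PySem

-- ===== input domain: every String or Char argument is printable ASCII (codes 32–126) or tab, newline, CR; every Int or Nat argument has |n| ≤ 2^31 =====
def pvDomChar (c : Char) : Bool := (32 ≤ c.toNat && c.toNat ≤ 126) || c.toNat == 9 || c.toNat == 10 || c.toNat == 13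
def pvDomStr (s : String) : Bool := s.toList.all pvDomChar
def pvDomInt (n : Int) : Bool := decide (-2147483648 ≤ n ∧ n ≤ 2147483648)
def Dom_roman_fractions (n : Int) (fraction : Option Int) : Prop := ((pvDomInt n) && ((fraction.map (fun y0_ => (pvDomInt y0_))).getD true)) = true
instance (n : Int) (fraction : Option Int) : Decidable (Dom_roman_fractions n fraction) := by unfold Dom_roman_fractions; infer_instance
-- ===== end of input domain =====

-- B replaces A's greedy subtraction loop by a place-value table decomposition (alternative algorithm, same cost).

-- ===== PORT A =====
-- the `values` dict in insertion order (keys as char lists, iterated as (key, value) pairs)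
def valuesA : List (List Char × Int) :=
  [("M".toList, 1000), ("CM".toList, 900), ("D".toList, 500), ("CD".toList, 400),
   ("C".toList, 100), ("XC".toList, 90), ("L".toList, 50), ("XL".toList, 40),
   ("X".toList, 10), ("IX".toList, 9), ("V".toList, 5), ("IV".toList, 4), ("I".toList, 1)]

def fracValsA : List (List Char) :=
  [".", ":", ":.", "::", ":.:", "S", "S.", "S:", "S:.", "S::", "S:.:", "I"].map String.toList

-- hand port of Python's `str * int` (exact: non-positive count gives the empty string)
def strMulA (cs : List Char) (k : Int) : List Char := (List.replicate k.toNat cs).flatten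

-- the `for symbol in values` greedy loop; state = (n, output)
def greedyA (n : Int) : List Char :=
  (valuesA.foldl (fun (s : Int × List Char) p =>
    let symbol_count := PySem.Int.floordiv s.1 p.2
    if symbol_count ≥ 1 then (s.1 - symbol_count * p.2, s.2 ++ strMulA p.1 symbol_count) else s)
    (n, [])).2

def roman_fractions (n : Int) (fraction : Option Int) : String :=
  if (n < 0 ∨ n > 5000) ∨ (fraction ≠ none ∧ (fraction.getD 0 < 0 ∨ fraction.getD 0 > 12)) ∨
      (n = 0 ∧ fraction = some 12) then "NaR"
  else if n = 0 ∧ (fraction = none ∨ fraction = some 0) then "N"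
  else
    let output := greedyA n
    match fraction with
    | none => String.ofList output
    | some f =>
      if f = 0 then String.ofList output
      else String.ofList (output ++ ((PySem.List.pyGet? fracValsA (f - 1)).getD []))

-- ===== PORT B =====
def unitsB : List (List Char) := ["", "I", "II", "III", "IV", "V", "VI", "VII", "VIII", "IX"].map String.toList
def tensB : List (List Char) := ["", "X", "XX", "XXX", "XL", "L", "LX", "LXX", "LXXX", "XC"].map String.toList
def hundredsB : List (List Char) := ["", "C", "CC", "CCC", "CD", "D", "DC", "DCC", "DCCC", "CM"].map String.toList
def thousandsB : List (List Char) := ["", "M", "MM", "MMM", "MMMM", "MMMMM"].map String.toList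

def fracValsB : List (List Char) :=
  [".", ":", ":.", "::", ":.:", "S", "S.", "S:", "S:.", "S::", "S:.:", "I"].map String.toList

-- output = thousands[n//1000] + hundreds[n%1000//100] + tens[n%100//10] + units[n%10]
def placeValueB (n : Int) : List Char :=
  ((PySem.List.pyGet? thousandsB (PySem.Int.floordiv n 1000)).getD []) ++
  ((PySem.List.pyGet? hundredsB (PySem.Int.floordiv (PySem.Int.mod n 1000) 100)).getD []) ++
  ((PySem.List.pyGet? tensB (PySem.Int.floordiv (PySem.Int.mod n 100) 10)).getD []) ++
  ((PySem.List.pyGet? unitsB (PySem.Int.mod n 10)).getD [])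

def roman_fractions_alt (n : Int) (fraction : Option Int) : String :=
  if (n < 0 ∨ n > 5000) ∨ (fraction ≠ none ∧ (fraction.getD 0 < 0 ∨ fraction.getD 0 > 12)) ∨
      (n = 0 ∧ fraction = some 12) then "NaR"
  else if n = 0 ∧ (fraction = none ∨ fraction = some 0) then "N"
  else
    let output := placeValueB n
    match fraction with
    | none => String.ofList output
    | some f =>
      if f = 0 then String.ofList output
      else String.ofList (output ++ ((PySem.List.pyGet? fracValsB (f - 1)).getD []))

-- ===== PRECONDITION & SPEC =====
def Spec_roman_fractions (n : Int) (fraction : Option Int) (out : String) : Prop := out = roman_fractions_alt n fraction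
instance (n : Int) (fraction : Option Int) (out : String) : Decidable (Spec_roman_fractions n fraction out) := by unfold Spec_roman_fractions; infer_instance

-- ===== CLAIM (what is proved, stated in full; the proofs are below) =====
def Claim_equal_roman_fractions : Prop := ∀ (n : Int) (fraction : Option Int), Dom_roman_fractions n fraction → Spec_roman_fractions n fraction (roman_fractions n fraction)

-- ===== LEMMAS AND PROOFS =====

-- exhaustive check of the core equality on the whole reachable range 0..5000
set_option maxRecDepth 100000 in
set_option maxHeartbeats 4000000 in
theorem greedy_eq_place_all :
    (List.range 5001).all (fun k => greedyA (k : Int) == placeValueB (k : Int)) = true := by decide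

theorem greedy_eq_place (n : Int) (h0 : 0 ≤ n) (h1 : n ≤ 5000) : greedyA n = placeValueB n := by
  have hk : n = ((n.toNat : Nat) : Int) := by omega
  have hmem : n.toNat ∈ List.range 5001 := List.mem_range.mpr (by omega)
  have := List.all_eq_true.mp greedy_eq_place_all _ hmem
  rw [hk]
  exact beq_iff_eq.mp this

-- ===== VERDICT (by name: the statement is the Claim_ definition above) =====
theorem roman_fractions_spec : Claim_equal_roman_fractions := by
  intro n fraction _
  unfold Spec_roman_fractions roman_fractions roman_fractions_alt
  split_ifs with h1 h2
  · rfl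
  · rfl
  · have h0 : 0 ≤ n ∧ n ≤ 5000 := by push Not at h1; exact h1.1
    rw [greedy_eq_place n h0.1 h0.2]
    cases fraction with
    | none => rfl
    | some f =>
      simp only [fracValsA, fracValsB]
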